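-- pv_equiv track=rewrite | github.com/anikislam104/CodeforcesPython | VanyaAndFence.py | calculate_width
-- ===== SOURCE A (Python) =====
-- def calculate_width(n, h, heights):
--     width = 0
--     for i in range(n):
--         if heights[i] > h:
--             width += 2
--         else:
--             width += 1
--     return width
-- ===== SOURCE B (Python) =====
-- def calculate_width(n, h, heights):
--     # Sort the first n planks, then binary-search for the first plank taller
--     # than h: every plank at or after that position contributes 2, the rest 1,
--     # so the answer is 2*len(planks) - (position of first taller plank).
--     planks = sorted(heights[:n]) if n > 0 else []
--     lo, hi = 0, len(planks)
--     while lo < hi: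
--         mid = (lo + hi) // 2
--         if planks[mid] > h:
--             hi = mid
--         else:
--             lo = mid + 1
--     return 2 * len(planks) - lo
-- ===== Notes on version B (the rewrite author's own statement) =====
-- stated objective: alternative
-- what changed: B sorts the first n heights and binary-searches for the first plank taller than h, returning 2*n minus that position, instead of A's per-plank 2-or-1 accumulation loop.
import Mathlib
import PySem

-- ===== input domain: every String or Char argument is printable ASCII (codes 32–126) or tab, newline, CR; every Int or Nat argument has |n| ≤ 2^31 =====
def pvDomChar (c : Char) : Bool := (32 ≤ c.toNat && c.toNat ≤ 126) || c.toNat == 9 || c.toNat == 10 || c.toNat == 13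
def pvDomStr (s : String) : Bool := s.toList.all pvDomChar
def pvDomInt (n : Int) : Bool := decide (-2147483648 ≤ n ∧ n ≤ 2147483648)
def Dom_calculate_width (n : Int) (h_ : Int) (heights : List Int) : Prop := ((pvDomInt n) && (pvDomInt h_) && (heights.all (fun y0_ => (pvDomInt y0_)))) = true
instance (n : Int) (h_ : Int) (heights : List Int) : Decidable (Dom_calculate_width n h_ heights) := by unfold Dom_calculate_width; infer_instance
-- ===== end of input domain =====

-- B replaces A's per-plank 2-or-1 accumulation with sort-then-binary-search:
-- it sorts the first n heights, binary-searches the first plank taller than h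
-- and returns 2*n minus that position (alternative algorithm, same result).

-- ===== PORT A =====
-- the loop raises IndexError when an index is out of range; the Option threads that (none = raise), excluded by Pre_
def calculate_width (n : Int) (h_ : Int) (heights : List Int) : Int :=
  ((PySem.List.pyRange 0 n 1).foldl
    (fun acc i => acc.bind fun w =>
      (PySem.List.pyGet? heights i).map fun x => if x > h_ then w + 2 else w + 1)
    (some 0)).getD 0

-- ===== PORT B =====
-- Source B's while-loop binary search; the invariant keeps mid in range, so the
-- none branch of pyGet? (Python's IndexError) is unreachable and returns lo.
def pvBS (planks : List Int) (h_ : Int) : Nat → Nat → Nat → Nat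
  | 0, lo, _ => lo
  | fuel + 1, lo, hi =>
    if lo < hi then
      match PySem.List.pyGet? planks (((lo + hi) / 2 : Nat) : Int) with
      | some x => if x > h_ then pvBS planks h_ fuel lo ((lo + hi) / 2)
                  else pvBS planks h_ fuel ((lo + hi) / 2 + 1) hi
      | none => lo
    else lo

def calculate_width_alt (n : Int) (h_ : Int) (heights : List Int) : Int :=
  let planks := if n > 0 then PySem.List.sorted (PySem.List.slice heights none (some n)) (fun x => x) false else []
  let lo := pvBS planks h_ planks.length 0 planks.length
  2 * (planks.length : Int) - (lo : Int)

-- ===== PRECONDITION & SPEC =====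
-- Pre_ excludes exactly the inputs where A raises IndexError: n larger than len(heights).
def Pre_calculate_width (n : Int) (h_ : Int) (heights : List Int) : Prop :=
  n ≤ (heights.length : Int)
instance (n : Int) (h_ : Int) (heights : List Int) : Decidable (Pre_calculate_width n h_ heights) := by
  unfold Pre_calculate_width; infer_instance

def pvWitness_calculate_width : Int × Int × List Int := (2, 5, [3, 7])

def Spec_calculate_width (n : Int) (h_ : Int) (heights : List Int) (out : Int) : Prop := out = calculate_width_alt n h_ heights
instance (n : Int) (h_ : Int) (heights : List Int) (out : Int) : Decidable (Spec_calculate_width n h_ heights out) := by unfold Spec_calculate_width; infer_instance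

-- ===== CLAIM (what is proved, stated in full; the proofs are below) =====
def Claim_equal_calculate_width : Prop := ∀ (n : Int) (h_ : Int) (heights : List Int), Dom_calculate_width n h_ heights → Pre_calculate_width n h_ heights → Spec_calculate_width n h_ heights (calculate_width n h_ heights)

-- ===== LEMMAS AND PROOFS =====

-- A's Option-threaded fold over range(m): with m ≤ len, it returns
-- some (m + number of planks taller than h among the first m)
theorem pv_A_fold (h_ : Int) (heights : List Int) :
    ∀ m : Nat, m ≤ heights.length →
      (PySem.List.pyRange 0 (m : Int) 1).foldl
        (fun acc i => acc.bind fun w =>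
          (PySem.List.pyGet? heights i).map fun x => if x > h_ then w + 2 else w + 1)
        (some 0)
      = some ((m : Int) + ((heights.take m).countP (fun x => h_ < x) : Int)) := by
  intro m
  induction m with
  | zero => intro _; simp [PySem.List.pyRange_one_eq_nil]
  | succ m ih =>
    intro hm
    have hm' : m ≤ heights.length := by omega
    have hmlt : m < heights.length := by omega
    rw [show ((m + 1 : Nat) : Int) = (m : Int) + 1 by push_cast; ring,
        PySem.List.pyRange_one_succ_right (Int.natCast_nonneg m),
        List.foldl_append, ih hm']
    have hget : PySem.List.pyGet? heights (m : Int) = some (heights[m]'hmlt) := by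
      rw [PySem.List.pyGet?_of_nonneg heights (Int.natCast_nonneg m)]
      simp only [Int.toNat_natCast]
      exact List.getElem?_eq_getElem hmlt
    have htake : heights.take (m + 1) = heights.take m ++ [heights[m]'hmlt] :=
      List.take_succ_eq_append_getElem hmlt
    simp only [List.foldl_cons, List.foldl_nil, Option.bind_some, hget, Option.map_some]
    rw [htake, List.countP_append]
    by_cases hx : heights[m]'hmlt > h_
    · rw [if_pos hx]
      have : List.countP (fun x => decide (h_ < x)) [heights[m]'hmlt] = 1 := by
        simp [hx]
      rw [this]; congr 1; push_cast; ring
    · rw [if_neg hx]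
      have : List.countP (fun x => decide (h_ < x)) [heights[m]'hmlt] = 0 := by
        simp [List.countP_cons]; omega
      rw [this]; congr 1; push_cast; ring

-- binary-search invariant: on a nondecreasing list, pvBS returns the position
-- of the first element greater than h_
theorem pvBS_spec (s : List Int) (h_ : Int)
    (hmono : ∀ p q : Nat, (hpq : p ≤ q) → ∀ hq : q < s.length, s[p]'(by omega) ≤ s[q]) :
    ∀ (fuel lo hi : Nat), hi - lo ≤ fuel → lo ≤ hi → hi ≤ s.length →
      (∀ i : Nat, ∀ h' : i < s.length, i < lo → s[i] ≤ h_) →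
      (∀ i : Nat, ∀ h' : i < s.length, hi ≤ i → h_ < s[i]) →
      lo ≤ pvBS s h_ fuel lo hi ∧ pvBS s h_ fuel lo hi ≤ hi ∧
      (∀ i : Nat, ∀ h' : i < s.length, i < pvBS s h_ fuel lo hi → s[i] ≤ h_) ∧
      (∀ i : Nat, ∀ h' : i < s.length, pvBS s h_ fuel lo hi ≤ i → h_ < s[i]) := by
  intro fuel
  induction fuel with
  | zero =>
    intro lo hi hk hlh hhle hlow hhigh
    have : lo = hi := by omega
    subst this
    exact ⟨le_refl _, le_refl _, fun i h' hi' => hlow i h' hi',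
      fun i h' hi' => hhigh i h' hi'⟩
  | succ fuel ih =>
    intro lo hi hk hlh hhle hlow hhigh
    show _ ≤ pvBS _ _ (fuel+1) lo hi ∧ _
    rw [pvBS]
    by_cases hlt : lo < hi
    · rw [if_pos hlt]
      have hmidlt : (lo + hi) / 2 < s.length := by omega
      have hget : PySem.List.pyGet? s (((lo + hi) / 2 : Nat) : Int) = some (s[(lo + hi) / 2]'hmidlt) := by
        rw [PySem.List.pyGet?_of_nonneg s (Int.natCast_nonneg _)]
        simp only [Int.toNat_natCast]
        exact List.getElem?_eq_getElem hmidlt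
      simp only [hget]
      by_cases hx : s[(lo + hi) / 2]'hmidlt > h_
      · rw [if_pos hx]
        exact
          have h1 := ih lo ((lo + hi) / 2) (by omega) (by omega)
            (by omega) hlow
            (fun i h' hge => lt_of_lt_of_le hx (hmono _ i hge h'))
          ⟨h1.1, by omega, h1.2.2.1, h1.2.2.2⟩
      · rw [if_neg hx]
        replace hx := not_lt.mp hx
        exact
          have h1 := ih ((lo + hi) / 2 + 1) hi (by omega) (by omega) hhle
            (fun i h' hilt => le_trans (hmono i ((lo + hi) / 2) (by omega) hmidlt) hx)
            hhigh
          ⟨by omega, h1.2.1, h1.2.2.1, h1.2.2.2⟩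
    · rw [if_neg hlt]
      exact ⟨le_refl _, hlh, fun i h' hi' => hlow i h' hi',
        fun i h' hi' => hhigh i h' (by omega)⟩

-- a split position with "≤ h_ below, > h_ at and above" determines the count of taller planks
theorem pv_count_of_split (s : List Int) (h_ : Int) (r : Nat) (hr : r ≤ s.length)
    (h1 : ∀ i : Nat, ∀ h' : i < s.length, i < r → s[i] ≤ h_)
    (h2 : ∀ i : Nat, ∀ h' : i < s.length, r ≤ i → h_ < s[i]) :
    s.countP (fun x => h_ < x) = s.length - r := by
  have hsplit : s = s.take r ++ s.drop r := (List.take_append_drop r s).symm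
  have hc1 : (s.take r).countP (fun x => h_ < x) = 0 := by
    rw [List.countP_eq_zero]
    intro x hx
    obtain ⟨i, hi, hix⟩ := List.mem_iff_getElem.mp hx
    have hilen : i < s.length := by
      simp only [List.length_take] at hi; omega
    have hir : i < r := by
      simp only [List.length_take] at hi; omega
    have hx' : x ≤ h_ := by
      rw [← hix, List.getElem_take]
      exact h1 i hilen hir
    simp only [decide_eq_true_eq]
    omega
  have hc2 : (s.drop r).countP (fun x => h_ < x) = (s.drop r).length := by
    rw [List.countP_eq_length]
    intro x hx
    obtain ⟨i, hi, hix⟩ := List.mem_iff_getElem.mp hx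
    have hilen : r + i < s.length := by
      simp only [List.length_drop] at hi; omega
    have hx' : h_ < x := by
      rw [← hix, List.getElem_drop]
      exact h2 (r + i) hilen (by omega)
    simp only [decide_eq_true_eq]
    omega
  calc s.countP (fun x => h_ < x)
      = (s.take r ++ s.drop r).countP (fun x => h_ < x) := by rw [List.take_append_drop]
    _ = (s.take r).countP (fun x => h_ < x) + (s.drop r).countP (fun x => h_ < x) := List.countP_append ..
    _ = s.length - r := by rw [hc1, hc2, List.length_drop]; omega

-- B's value on the sorted prefix equals prefix length + number of taller planks
theorem pv_B_value (pre : List Int) (h_ : Int) :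
    2 * ((PySem.List.sorted pre (fun x => x) false).length : Int) -
      (pvBS (PySem.List.sorted pre (fun x => x) false) h_
        (PySem.List.sorted pre (fun x => x) false).length 0
        (PySem.List.sorted pre (fun x => x) false).length : Int)
    = (pre.length : Int) + (pre.countP (fun x => h_ < x) : Int) := by
  set s := PySem.List.sorted pre (fun x => x) false with hs
  have hmono : ∀ p q : Nat, (hpq : p ≤ q) → ∀ hq : q < s.length, s[p]'(by omega) ≤ s[q] := by
    intro p q hpq hq
    exact PySem.List.sorted_id_getElem_mono pre hpq hq
  have hspec := pvBS_spec s h_ hmono s.length 0 s.length (by omega) (Nat.zero_le _) (le_refl _)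
    (fun i h' hi => absurd hi (Nat.not_lt_zero i))
    (fun i h' hi => absurd h' (by omega))
  have hcnt : s.countP (fun x => h_ < x) = s.length - pvBS s h_ s.length 0 s.length :=
    pv_count_of_split s h_ (pvBS s h_ s.length 0 s.length) hspec.2.1 hspec.2.2.1 hspec.2.2.2
  have hperm : s.Perm pre := PySem.List.sorted_perm ..
  have hlen : s.length = pre.length := hperm.length_eq
  have hcnt' : s.countP (fun x => h_ < x) = pre.countP (fun x => h_ < x) := hperm.countP_eq _
  have hbs := hspec.2.1
  omega

theorem calculate_width_spec : Claim_equal_calculate_width := by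
  intro n h_ heights _ hpre
  unfold Spec_calculate_width calculate_width calculate_width_alt
  unfold Pre_calculate_width at hpre
  by_cases hn : n > 0
  · have hnn : 0 ≤ n := by omega
    have hslice : PySem.List.slice heights none (some n) = heights.take n.toNat := by
      rw [show n = ((n.toNat : Nat) : Int) by omega]
      exact PySem.List.slice_to_natCast ..
    have hA := pv_A_fold h_ heights n.toNat (by omega)
    rw [show ((n.toNat : Nat) : Int) = n by omega] at hA
    simp only [if_pos hn, hslice]
    rw [hA, Option.getD_some, pv_B_value (heights.take n.toNat) h_]
    have : (heights.take n.toNat).length = n.toNat := by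
      simp only [List.length_take]; omega
    rw [this]
    omega
  · simp only [if_neg hn]
    rw [PySem.List.pyRange_one_eq_nil (by omega)]
    simp [pvBS]
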